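-- pv_equiv track=rewrite | github.com/RABL1N/-02464-Project-1 | Free recall experiment/Speed/free_recall_experiment.py | estimate_phono_confusions
-- ===== SOURCE A (Python) =====
-- PHONO_PAIRS = {("B","P"), ("D","T"), ("G","K"), ("F","S"), ("M","N"), ("V","B"), ("V","F")}
--
-- def estimate_phono_confusions(target_letters, resp_letters):
--     """Heuristic: count responses that are not in target but are a phonological neighbor of some target."""
--     tset = set(target_letters)
--     conf = 0
--     for r in resp_letters:
--         if r not in tset:
--             for a,b in PHONO_PAIRS:
--                 if (r==a and b in tset) or (r==b and a in tset):
--                     conf += 1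
--                     break
--     return conf
-- ===== SOURCE B (Python) =====
-- PHONO_PAIRS = {("B","P"), ("D","T"), ("G","K"), ("F","S"), ("M","N"), ("V","B"), ("V","F")}
--
-- def estimate_phono_confusions(target_letters, resp_letters):
--     """Heuristic: count responses that are not in target but are a phonological neighbor of some target."""
--     tset = set(target_letters)
--     # Stage 1: from the pairs alone, derive the finite set of confusable letters
--     # (letters outside the target set whose partner is a target).
--     confusable = set()
--     for a, b in PHONO_PAIRS:
--         if b in tset and a not in tset:
--             confusable.add(a)
--         if a in tset and b not in tset:
--             confusable.add(b)
--     # Stage 2: total multiplicity of those letters among the responses.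
--     return sum(resp_letters.count(x) for x in confusable)
-- ===== Notes on version B (the rewrite author's own statement) =====
-- stated objective: alternative
-- what changed: Inverted the loop structure: instead of scanning the pair list once per response, B first derives from the pairs alone the finite set of confusable letters (non-target letters with a target partner) and then returns the total multiplicity of those letters in the responses via per-letter counts; no response is ever compared against a pair.
import Mathlib
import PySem

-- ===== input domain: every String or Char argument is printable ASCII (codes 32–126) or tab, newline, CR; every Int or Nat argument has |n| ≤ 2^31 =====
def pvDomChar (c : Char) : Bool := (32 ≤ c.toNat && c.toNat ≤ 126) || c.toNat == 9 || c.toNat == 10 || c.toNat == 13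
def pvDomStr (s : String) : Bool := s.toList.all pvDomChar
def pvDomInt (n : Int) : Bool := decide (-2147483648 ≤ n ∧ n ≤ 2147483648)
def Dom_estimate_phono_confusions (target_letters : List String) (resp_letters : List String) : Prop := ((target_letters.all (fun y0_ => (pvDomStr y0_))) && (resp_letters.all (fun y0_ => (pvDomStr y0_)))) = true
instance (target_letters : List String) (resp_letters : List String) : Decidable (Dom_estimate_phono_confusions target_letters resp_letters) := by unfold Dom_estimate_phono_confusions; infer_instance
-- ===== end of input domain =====

-- B inverts the loop structure: it first derives from the pairs the set of confusable
-- letters, then sums those letters' multiplicities in the responses (objective: alternative).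
-- ===== PORT A =====
-- PHONO_PAIRS: Python iterates this set in hash order, which is not modelled, but A only
-- uses 'some pair matches → +1 (break)', which is order-independent.
def pvPhonoPairs : List (String × String) :=
  [("B","P"), ("D","T"), ("G","K"), ("F","S"), ("M","N"), ("V","B"), ("V","F")]

def estimate_phono_confusions (target_letters : List String) (resp_letters : List String) : Int :=
  let tset : PySem.Set String := PySem.Set.ofList target_letters
  resp_letters.foldl (fun conf r =>
    if !(PySem.Set.contains tset r) then
      -- inner 'for a,b in PHONO_PAIRS: … conf += 1; break' = +1 iff some pair matches
      if pvPhonoPairs.any (fun p => (r == p.1 && PySem.Set.contains tset p.2) ||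
                                    (r == p.2 && PySem.Set.contains tset p.1)) then
        conf + 1
      else conf
    else conf) 0

-- ===== PORT B =====
-- Stage 1: the set of confusable letters, built from the pairs alone
def pvConfusable (tset : PySem.Set String) : PySem.Set String :=
  pvPhonoPairs.foldl (fun cs p =>
    let cs1 := if PySem.Set.contains tset p.2 && !(PySem.Set.contains tset p.1)
               then PySem.Set.add cs p.1 else cs
    if PySem.Set.contains tset p.1 && !(PySem.Set.contains tset p.2)
    then PySem.Set.add cs1 p.2 else cs1) PySem.Set.empty

def estimate_phono_confusions_alt (target_letters : List String) (resp_letters : List String) : Int :=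
  let tset : PySem.Set String := PySem.Set.ofList target_letters
  -- Stage 2: sum(resp_letters.count(x) for x in confusable) — a sum over a set, order-free
  ((pvConfusable tset).map (fun x => (PySem.List.count resp_letters x : Int))).sum

-- ===== PRECONDITION & SPEC =====
def Spec_estimate_phono_confusions (target_letters : List String) (resp_letters : List String) (out : Int) : Prop := out = estimate_phono_confusions_alt target_letters resp_letters
instance (target_letters : List String) (resp_letters : List String) (out : Int) : Decidable (Spec_estimate_phono_confusions target_letters resp_letters out) := by unfold Spec_estimate_phono_confusions; infer_instance

-- ===== CLAIM (what is proved, stated in full; the proofs are below) =====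
def Claim_equal_estimate_phono_confusions : Prop := ∀ (target_letters : List String) (resp_letters : List String), Dom_estimate_phono_confusions target_letters resp_letters → Spec_estimate_phono_confusions target_letters resp_letters (estimate_phono_confusions target_letters resp_letters)

-- ===== LEMMAS AND PROOFS =====

-- membership in the confusable-set fold
lemma step_mem (tset cs : List String) (p : String × String) (r : String) :
    r ∈ (let cs1 := if PySem.Set.contains tset p.2 && !(PySem.Set.contains tset p.1)
                    then PySem.Set.add cs p.1 else cs
         if PySem.Set.contains tset p.1 && !(PySem.Set.contains tset p.2)
         then PySem.Set.add cs1 p.2 else cs1)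
      ↔ r ∈ cs ∨
        (r = p.1 ∧ PySem.Set.contains tset p.2 ∧ ¬ PySem.Set.contains tset p.1) ∨
        (r = p.2 ∧ PySem.Set.contains tset p.1 ∧ ¬ PySem.Set.contains tset p.2) := by
  cases h1 : PySem.Set.contains tset p.1 <;>
    cases h2 : PySem.Set.contains tset p.2 <;>
      simp [PySem.Set.mem_add]

lemma mem_confusable_fold (tset : List String) (pairs : List (String × String))
    (cs : List String) (r : String) :
    r ∈ pairs.foldl (fun cs p =>
      let cs1 := if PySem.Set.contains tset p.2 && !(PySem.Set.contains tset p.1)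
                 then PySem.Set.add cs p.1 else cs
      if PySem.Set.contains tset p.1 && !(PySem.Set.contains tset p.2)
      then PySem.Set.add cs1 p.2 else cs1) cs
      ↔ r ∈ cs ∨ ∃ p ∈ pairs,
          (r = p.1 ∧ PySem.Set.contains tset p.2 ∧ ¬ PySem.Set.contains tset p.1) ∨
          (r = p.2 ∧ PySem.Set.contains tset p.1 ∧ ¬ PySem.Set.contains tset p.2) := by
  induction pairs generalizing cs with
  | nil => simp
  | cons p rest ih =>
    rw [List.foldl_cons, ih, step_mem tset cs p r, List.exists_mem_cons_iff]
    exact or_assoc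

lemma mem_pvConfusable (tset : List String) (r : String) :
    r ∈ pvConfusable tset ↔ ∃ p ∈ pvPhonoPairs,
      (r = p.1 ∧ PySem.Set.contains tset p.2 ∧ ¬ PySem.Set.contains tset p.1) ∨
      (r = p.2 ∧ PySem.Set.contains tset p.1 ∧ ¬ PySem.Set.contains tset p.2) := by
  unfold pvConfusable
  rw [mem_confusable_fold]
  simp [PySem.Set.empty]

lemma nodup_confusable_fold (tset : List String) (pairs : List (String × String))
    (cs : List String) (h : cs.Nodup) :
    (pairs.foldl (fun cs p =>
      let cs1 := if PySem.Set.contains tset p.2 && !(PySem.Set.contains tset p.1)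
                 then PySem.Set.add cs p.1 else cs
      if PySem.Set.contains tset p.1 && !(PySem.Set.contains tset p.2)
      then PySem.Set.add cs1 p.2 else cs1) cs).Nodup := by
  induction pairs generalizing cs with
  | nil => exact h
  | cons p rest ih =>
    refine ih _ ?_
    dsimp only
    split_ifs <;> first
      | exact PySem.Set.nodup_add _ _ (PySem.Set.nodup_add _ _ h)
      | exact PySem.Set.nodup_add _ _ h
      | exact h

-- indicator sum over a Nodup list
lemma sum_indicator_nodup (cs : List String) (h : cs.Nodup) (y : String) :
    ((cs.map (fun x => if y == x then (1 : Int) else 0)).sum)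
      = if y ∈ cs then 1 else 0 := by
  induction cs with
  | nil => simp
  | cons c rest ih =>
    simp only [List.nodup_cons] at h
    rw [List.map_cons, List.sum_cons, ih h.2]
    by_cases hy : y = c
    · subst hy; simp [h.1]
    · simp [hy, beq_iff_eq]

-- sum of per-letter counts over a Nodup set = countP of membership
lemma sum_counts_eq_countP (cs : List String) (h : cs.Nodup) (resp : List String) :
    ((cs.map (fun x => (PySem.List.count resp x : Int))).sum)
      = ((resp.countP (fun y => decide (y ∈ cs)) : Nat) : Int) := by
  induction resp with
  | nil => simp [PySem.List.count_eq]
  | cons y ys ih =>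
    have hstep : (cs.map (fun x => (PySem.List.count (y :: ys) x : Int)))
        = cs.map (fun x => (PySem.List.count ys x : Int) + if y == x then 1 else 0) := by
      refine List.map_congr_left (fun x _ => ?_)
      simp only [PySem.List.count_eq, List.count_cons]
      push_cast
      split_ifs <;> simp
    rw [hstep, List.countP_cons, PySem.List.sum_map_add_int, ih,
        sum_indicator_nodup cs h y]
    by_cases hy : y ∈ cs <;> simp [hy]

-- A's per-response test = membership in the confusable set
lemma pred_eq_mem (tset : List String) (y : String) :
    (!(PySem.Set.contains tset y) &&
      pvPhonoPairs.any (fun p => (y == p.1 && PySem.Set.contains tset p.2) ||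
                                 (y == p.2 && PySem.Set.contains tset p.1)))
      = decide (y ∈ pvConfusable tset) := by
  rw [Bool.eq_iff_iff]
  simp only [decide_eq_true_eq, mem_pvConfusable, Bool.and_eq_true, Bool.not_eq_true',
    List.any_eq_true, Bool.or_eq_true, beq_iff_eq]
  constructor
  · rintro ⟨hnot, p, hp, ⟨rfl, h2⟩ | ⟨rfl, h1⟩⟩
    · exact ⟨p, hp, Or.inl ⟨rfl, h2, fun hm => by rw [hm] at hnot; cases hnot⟩⟩
    · exact ⟨p, hp, Or.inr ⟨rfl, h1, fun hm => by rw [hm] at hnot; cases hnot⟩⟩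
  · rintro ⟨p, hp, ⟨rfl, h2, h1⟩ | ⟨rfl, h1, h2⟩⟩
    · exact ⟨by simpa using h1, p, hp, Or.inl ⟨rfl, h2⟩⟩
    · exact ⟨by simpa using h2, p, hp, Or.inr ⟨rfl, h1⟩⟩

-- A's loop is a countP
lemma loopA_eq_countP (tset resp : List String) :
    resp.foldl (fun conf r =>
      if !(PySem.Set.contains tset r) then
        if pvPhonoPairs.any (fun p => (r == p.1 && PySem.Set.contains tset p.2) ||
                                      (r == p.2 && PySem.Set.contains tset p.1)) then
          conf + 1
        else conf
      else conf) 0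
    = ((resp.countP (fun y => decide (y ∈ pvConfusable tset)) : Nat) : Int) := by
  have hbody : ∀ (conf : Int) (r : String),
      (if !(PySem.Set.contains tset r) then
        if pvPhonoPairs.any (fun p => (r == p.1 && PySem.Set.contains tset p.2) ||
                                      (r == p.2 && PySem.Set.contains tset p.1)) then
          conf + 1
        else conf
      else conf)
      = if decide (r ∈ pvConfusable tset) then conf + 1 else conf := by
    intro conf r
    rw [← pred_eq_mem tset r]
    cases hc : PySem.Set.contains tset r <;>
      cases hp : pvPhonoPairs.any (fun p => (r == p.1 && PySem.Set.contains tset p.2) ||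
                                      (r == p.2 && PySem.Set.contains tset p.1)) <;>
      simp
  calc resp.foldl _ 0
      = resp.foldl (fun conf r => if decide (r ∈ pvConfusable tset) then conf + 1 else conf) 0 := by
        exact PySem.List.foldl_congr_mem _ _ _ _ (fun acc x _ => hbody acc x)
    _ = 0 + ((resp.countP (fun y => decide (y ∈ pvConfusable tset)) : Nat) : Int) :=
        PySem.List.foldl_if_add_one _ resp 0
    _ = _ := by ring

-- ===== VERDICT (by name: the statement is the Claim_ definition above) =====
theorem estimate_phono_confusions_spec : Claim_equal_estimate_phono_confusions := by
  intro target_letters resp_letters _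
  unfold Spec_estimate_phono_confusions
  have hA : estimate_phono_confusions target_letters resp_letters
      = ((resp_letters.countP (fun y =>
          decide (y ∈ pvConfusable (PySem.Set.ofList target_letters))) : Nat) : Int) :=
    loopA_eq_countP (PySem.Set.ofList target_letters) resp_letters
  have hB : estimate_phono_confusions_alt target_letters resp_letters
      = ((resp_letters.countP (fun y =>
          decide (y ∈ pvConfusable (PySem.Set.ofList target_letters))) : Nat) : Int) :=
    sum_counts_eq_countP (pvConfusable (PySem.Set.ofList target_letters))
      (nodup_confusable_fold (PySem.Set.ofList target_letters) pvPhonoPairs [] List.nodup_nil)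
      resp_letters
  rw [hA, hB]
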